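-- pv_equiv track=rewrite | github.com/uniparthenope-fgpe/7f3e5e21-52b1-425c-a59d-3330637aaabf | exercises/62ff78ae-f77c-4547-98d2-8c377842f0c2/solutions/96acf9c0-e8ea-488b-aab9-f7dea2d2cc8a/sol.py | sorting_hat
-- ===== SOURCE A (Python) =====
-- def sorting_hat(students):
--     houses = {'Gryffindor': [], 'Hufflepuff': [], 'Ravenclaw': [], 'Slytherin': []}
--     for student in students:
--         if student[0] in 'GH':
--             houses['Gryffindor'].append(student)
--         elif student[0] in 'HP':
--             houses['Hufflepuff'].append(student)
--         elif student[0] in 'R':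
--             houses['Ravenclaw'].append(student)
--         else:
--             houses['Slytherin'].append(student)
--     return houses
-- ===== SOURCE B (Python) =====
-- _HOUSES = ('Gryffindor', 'Hufflepuff', 'Ravenclaw', 'Slytherin')
--
-- def _house(student):
--     c = student[0]
--     if c == 'G' or c == 'H':
--         return 'Gryffindor'
--     if c == 'P':
--         return 'Hufflepuff'
--     if c == 'R':
--         return 'Ravenclaw'
--     return 'Slytherin'
--
-- def sorting_hat(students):
--     return {h: [s for s in students if _house(s) == h] for h in _HOUSES}
-- ===== Notes on version B (the rewrite author's own statement) =====
-- stated objective: alternative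
-- what changed: Instead of one pass that mutates a pre-built dict of buckets via an if/elif chain of appends, B classifies each student with a pure helper and builds the result as a dict comprehension of four independent filter passes (one per house), with no mutation.
import Mathlib
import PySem

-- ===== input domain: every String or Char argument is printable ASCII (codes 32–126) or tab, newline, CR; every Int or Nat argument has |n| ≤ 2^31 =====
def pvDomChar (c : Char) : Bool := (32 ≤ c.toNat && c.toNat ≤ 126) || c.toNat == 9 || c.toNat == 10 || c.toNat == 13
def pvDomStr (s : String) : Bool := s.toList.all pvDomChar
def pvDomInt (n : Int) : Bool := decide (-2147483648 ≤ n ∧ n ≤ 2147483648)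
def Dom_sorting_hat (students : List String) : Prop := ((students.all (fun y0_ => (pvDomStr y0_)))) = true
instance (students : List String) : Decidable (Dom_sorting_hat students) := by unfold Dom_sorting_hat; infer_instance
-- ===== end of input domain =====

-- B replaces A's single mutating pass (pre-built dict of buckets, if/elif chain of appends) with a
-- pure classification helper and a dict comprehension of four independent filter passes; same cost,
-- no speed claim. Both raise IndexError on an empty-string student, excluded by Pre_.

-- ===== PORT A =====
def sortingHatInit : PySem.Dict String (List String) :=
  PySem.Dict.ofList [("Gryffindor", []), ("Hufflepuff", []), ("Ravenclaw", []), ("Slytherin", [])]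

def sortingHatStepA (houses : PySem.Dict String (List String)) (student : String) :
    PySem.Dict String (List String) :=
  match PySem.Str.pyGet? student 0 with
  | none => houses  -- student[0] raises IndexError in Python; excluded by Pre_
  | some c =>
    if ("GH".toList).contains c then houses.modify "Gryffindor" [] (· ++ [student])
    else if ("HP".toList).contains c then houses.modify "Hufflepuff" [] (· ++ [student])
    else if ("R".toList).contains c then houses.modify "Ravenclaw" [] (· ++ [student])
    else houses.modify "Slytherin" [] (· ++ [student])

def sorting_hat (students : List String) : List (String × List String) :=
  (students.foldl sortingHatStepA sortingHatInit).items

-- ===== PORT B =====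
def sortingHatHouse (student : String) : String :=
  match PySem.Str.pyGet? student 0 with
  | none => "Slytherin"  -- student[0] raises IndexError in Python; excluded by Pre_
  | some c =>
    if c = 'G' ∨ c = 'H' then "Gryffindor"
    else if c = 'P' then "Hufflepuff"
    else if c = 'R' then "Ravenclaw"
    else "Slytherin"

def sorting_hat_alt (students : List String) : List (String × List String) :=
  ["Gryffindor", "Hufflepuff", "Ravenclaw", "Slytherin"].map
    (fun h => (h, students.filter (fun s => sortingHatHouse s == h)))

-- ===== PRECONDITION & SPEC =====
-- Pre_ excludes lists containing an empty string, on which A raises IndexError at student[0].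
def Pre_sorting_hat (students : List String) : Prop := ∀ s ∈ students, s ≠ ""
instance (students : List String) : Decidable (Pre_sorting_hat students) := by
  unfold Pre_sorting_hat; infer_instance

def pvWitness_sorting_hat : List String := (["Harry", "Gina", "Zed"])

def Spec_sorting_hat (students : List String) (out : List (String × List String)) : Prop := out = sorting_hat_alt students
instance (students : List String) (out : List (String × List String)) : Decidable (Spec_sorting_hat students out) := by unfold Spec_sorting_hat; infer_instance

-- ===== CLAIM (what is proved, stated in full; the proofs are below) =====
def Claim_equal_sorting_hat : Prop := ∀ (students : List String), Dom_sorting_hat students → Pre_sorting_hat students → Spec_sorting_hat students (sorting_hat students)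

-- ===== LEMMAS AND PROOFS =====
-- A's branching step is, for a nonempty student, a modify at B's computed house key.
theorem sortingHatStepA_eq_modify (houses : PySem.Dict String (List String)) (s : String)
    (hs : s ≠ "") :
    sortingHatStepA houses s = houses.modify (sortingHatHouse s) [] (· ++ [s]) := by
  have hne : s.toList ≠ [] := fun h => hs (String.toList_eq_nil_iff.mp h)
  unfold sortingHatStepA sortingHatHouse
  cases hget : PySem.Str.pyGet? s 0 with
  | none =>
    exfalso
    rcases h : s.toList with _ | ⟨a, l⟩
    · exact hne h
    · simp [PySem.Str.pyGet?, PySem.List.pyGet?, PySem.List.pyIdx?, h] at hget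
  | some c =>
    dsimp only
    by_cases hG : c = 'G' ∨ c = 'H'
    · rcases hG with h | h <;> subst h <;> simp
    · rw [not_or] at hG
      obtain ⟨hG', hH⟩ := hG
      by_cases hP : c = 'P'
      · subst hP; simp
      · by_cases hR : c = 'R'
        · subst hR; simp
        · simp [hG', hH, hP, hR]

theorem sortingHat_fold_eq_pairs (students : List String)
    (hpre : ∀ s ∈ students, s ≠ "") :
    students.foldl sortingHatStepA sortingHatInit
      = (students.map (fun s => (sortingHatHouse s, s))).foldl
          (fun d p => d.modify p.1 [] (· ++ [p.2])) sortingHatInit := by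
  rw [List.foldl_map]
  apply PySem.List.foldl_congr_mem
  intro acc x hx
  exact sortingHatStepA_eq_modify acc x (hpre x hx)

theorem sortingHat_keys_aux (students : List String) (d : PySem.Dict String (List String))
    (h : d.keys = ["Gryffindor", "Hufflepuff", "Ravenclaw", "Slytherin"]) :
    (students.foldl sortingHatStepA d).keys
      = ["Gryffindor", "Hufflepuff", "Ravenclaw", "Slytherin"] := by
  induction students generalizing d with
  | nil => exact h
  | cons x xs ih =>
    rw [List.foldl_cons]
    apply ih
    unfold sortingHatStepA
    cases PySem.Str.pyGet? x 0 with
    | none => exact h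
    | some c =>
      dsimp only
      split_ifs <;>
        (rw [PySem.Dict.keys_modify, PySem.Dict.keys_insert_of_contains]
         · exact h
         · rw [PySem.Dict.contains_eq_decide_mem_keys, h]; decide)

theorem sortingHat_filter_pairs (h : String) (l : List String) :
    ((l.map (fun s => (sortingHatHouse s, s))).filter (fun p => p.1 == h)).map (·.2)
      = l.filter (fun s => sortingHatHouse s == h) := by
  induction l with
  | nil => rfl
  | cons x xs ih => by_cases hx : sortingHatHouse x == h <;> simp [hx, ih]

theorem sortingHat_getD (students : List String) (hpre : ∀ s ∈ students, s ≠ "")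
    (h : String) :
    (students.foldl sortingHatStepA sortingHatInit).getD h []
      = sortingHatInit.getD h [] ++ students.filter (fun s => sortingHatHouse s == h) := by
  rw [sortingHat_fold_eq_pairs students hpre, PySem.Dict.getD_foldl_modify_append,
      sortingHat_filter_pairs]

-- ===== VERDICT (by name: the statement is the Claim_ definition above) =====
theorem sorting_hat_spec : Claim_equal_sorting_hat := by
  intro students _ hpre
  unfold Spec_sorting_hat sorting_hat sorting_hat_alt
  have hkeys : (students.foldl sortingHatStepA sortingHatInit).keys
      = ["Gryffindor", "Hufflepuff", "Ravenclaw", "Slytherin"] :=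
    sortingHat_keys_aux students sortingHatInit (by decide)
  have hnd : (students.foldl sortingHatStepA sortingHatInit).keys.Nodup := by
    rw [hkeys]; decide
  rw [PySem.Dict.items_eq_map_keys _ hnd [], hkeys]
  have h1 : sortingHatInit.getD "Gryffindor" [] = [] := by decide
  have h2 : sortingHatInit.getD "Hufflepuff" [] = [] := by decide
  have h3 : sortingHatInit.getD "Ravenclaw" [] = [] := by decide
  have h4 : sortingHatInit.getD "Slytherin" [] = [] := by decide
  simp [sortingHat_getD students hpre, h1, h2, h3, h4]
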